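-- pv_equiv track=rewrite | github.com/jblesam/Ingenieria-Informatica | Criptografia/PECS/2019-2020_Sem2/02 Practica/PR2/P2020_Practica2_Solution_Skeleton.py | uoc_geffe_generator
-- ===== SOURCE A (Python) =====
-- def uoc_geffe_generator(parameters_pol_0, parameters_pol_1,
--                         parameters_pol_2, num_bits):
--     """
--     EXERCISE 1.2: Geffe generator implementation
--     :parameters_pol_X: A tupple with the LFSR connection polynomial and the
--                        LFSR initial state)
--     :num_bits: Number of output bits
--     :return: string of 0s and 1s with the result
--     """
--
--     output = ""
--
--     # --- IMPLEMENTATION GOES HERE ---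
--
--     def func_lfsr(polynomial, initial_state, num_bits):
--         new_pol = []
--         salida = []
--         for item in reversed(polynomial):
--             new_pol.append(item)
--         new_pol.pop()
--         for i in range(0, num_bits):
--             temporal = []
--             for i in range(0, len(initial_state)):
--                 if new_pol[i] == 1:
--                     temporal.append(initial_state[i])
--             XOR = 0
--             for i in range(0, len(temporal)):
--                 if temporal[i] == XOR:
--                     XOR = 0
--                 else:
--                     XOR = 1
--             initial_state.append(XOR)
--             salida.append(initial_state[0])
--             del (initial_state[0])
--         return salida
--
--     lfsr_0 = func_lfsr(parameters_pol_0[0], parameters_pol_0[1], num_bits)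
--     lfsr_1 = func_lfsr(parameters_pol_1[0], parameters_pol_1[1], num_bits)
--     lfsr_2 = func_lfsr(parameters_pol_2[0], parameters_pol_2[1], num_bits)
--
--
--     for i in (range(0, num_bits)):
--         if lfsr_0[i] == 0:
--             output += str(lfsr_1[i])
--         else:
--             output += str(lfsr_2[i])
--
--     # --------------------------------
--
--     return output
-- ===== SOURCE B (Python) =====
-- def uoc_geffe_generator(parameters_pol_0, parameters_pol_1,
--                         parameters_pol_2, num_bits):
--     # Recurrence view: an LFSR's output is simply its state sequence, extended
--     # past the initial state by the feedback recurrence.  No register is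
--     # simulated (the input state lists are not mutated; A mutates them).
--     n = max(num_bits, 0)
--
--     def stream(poly, state):
--         if n == 0:
--             return []
--         L = len(state)
--         rev = poly[1:][::-1]          # feedback coefficients: drop the constant term, reverse
--         taps = [i for i in range(L) if rev[i] == 1]
--         seq = list(state)
--         for j in range(L, n):
--             x = 0
--             for i in taps:
--                 x = 0 if seq[j - L + i] == x else 1
--             seq.append(x)
--         return seq[:n]
--
--     s0 = stream(*parameters_pol_0)
--     s1 = stream(*parameters_pol_1)
--     s2 = stream(*parameters_pol_2)
--     return "".join(str(b1 if b0 == 0 else b2)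
--                    for b0, b1, b2 in zip(s0, s1, s2))
-- ===== Notes on version B (the rewrite author's own statement) =====
-- stated objective: alternative
-- what changed: B replaces the shift-register simulation (three per-step list mutations: rebuild temporal, append feedback, delete the front) by the recurrence view: each LFSR output is its state sequence extended in place by the linear recurrence seq[j] = toggle-fold over seq[j-L+i] for tap indices i, computed by direct backward indexing into the already-produced prefix with no register state, then the three sequences are multiplexed by a single zip.
import Mathlib
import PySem

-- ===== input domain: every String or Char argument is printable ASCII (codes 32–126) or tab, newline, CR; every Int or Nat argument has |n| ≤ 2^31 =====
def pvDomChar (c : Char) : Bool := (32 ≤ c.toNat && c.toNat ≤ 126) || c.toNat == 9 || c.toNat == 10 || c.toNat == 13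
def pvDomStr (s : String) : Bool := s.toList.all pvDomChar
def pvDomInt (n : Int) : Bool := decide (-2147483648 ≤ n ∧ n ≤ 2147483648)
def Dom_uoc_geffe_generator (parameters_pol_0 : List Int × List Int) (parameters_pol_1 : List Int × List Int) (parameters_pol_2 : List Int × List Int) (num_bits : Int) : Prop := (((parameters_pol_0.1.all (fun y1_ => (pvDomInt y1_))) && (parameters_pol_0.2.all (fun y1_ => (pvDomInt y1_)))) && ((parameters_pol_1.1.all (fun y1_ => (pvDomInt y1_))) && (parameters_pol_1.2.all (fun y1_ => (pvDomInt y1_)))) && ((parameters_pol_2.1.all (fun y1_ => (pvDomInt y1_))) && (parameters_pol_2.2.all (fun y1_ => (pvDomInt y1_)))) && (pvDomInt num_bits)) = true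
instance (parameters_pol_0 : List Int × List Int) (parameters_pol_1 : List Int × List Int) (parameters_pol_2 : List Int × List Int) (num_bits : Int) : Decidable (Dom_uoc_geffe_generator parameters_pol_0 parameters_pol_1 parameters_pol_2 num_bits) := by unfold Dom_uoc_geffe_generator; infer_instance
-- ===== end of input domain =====

-- B replaces A's shift-register simulation by the recurrence view (the LFSR output IS its
-- state sequence extended by the feedback recurrence, computed by direct backward indexing),
-- then multiplexes the three sequences by one zip.  A mutates the callers' state lists, B does
-- not: the equivalence proved here is about the return value only.

-- ===== PORT A =====
-- One iteration of func_lfsr's loop body: build temporal, toggle-XOR it, append, emit front, del front.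
def pvA_step (newPol : List Int) (st : List Int) : Int × List Int :=
  let temporal := (List.range st.length).foldl (fun acc (i : Nat) =>
    if PySem.List.pyGetD newPol (i : Int) 0 == 1 then acc ++ [PySem.List.pyGetD st (i : Int) 0] else acc) []
  let x := temporal.foldl (fun xor t => if t == xor then (0 : Int) else 1) 0
  let st2 := st ++ [x]
  (st2.headD 0, st2.tail)          -- salida.append(initial_state[0]); del initial_state[0]

-- func_lfsr's outer loop: num_bits iterations, collecting salida.
def pvA_lfsr (newPol : List Int) : Nat → List Int → List Int
  | 0, _ => []
  | Nat.succ n, st =>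
    let p := pvA_step newPol st
    p.1 :: pvA_lfsr newPol n p.2

-- the final combine loop: output += str(lfsr_1[i]) if lfsr_0[i]==0 else str(lfsr_2[i])
def pvA_combine (l0 l1 l2 : List Int) (n : Nat) : List Char :=
  (List.range n).foldl (fun acc (i : Nat) =>
    acc ++ PySem.Int.toChars (if PySem.List.pyGetD l0 (i : Int) 0 == 0
      then PySem.List.pyGetD l1 (i : Int) 0 else PySem.List.pyGetD l2 (i : Int) 0)) []

def uoc_geffe_generator (parameters_pol_0 : List Int × List Int) (parameters_pol_1 : List Int × List Int) (parameters_pol_2 : List Int × List Int) (num_bits : Int) : String :=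
  -- new_pol = reversed(polynomial) with the last element popped = reverse.dropLast
  let lfsr0 := pvA_lfsr (parameters_pol_0.1.reverse.dropLast) num_bits.toNat parameters_pol_0.2
  let lfsr1 := pvA_lfsr (parameters_pol_1.1.reverse.dropLast) num_bits.toNat parameters_pol_1.2
  let lfsr2 := pvA_lfsr (parameters_pol_2.1.reverse.dropLast) num_bits.toNat parameters_pol_2.2
  String.mk (pvA_combine lfsr0 lfsr1 lfsr2 num_bits.toNat)

-- ===== PORT B =====
-- rev = poly[1:][::-1]; taps = [i for i in range(L) if rev[i] == 1]
-- ([::-1] is List.reverse, exact per PySem.List.slice?_none_none_neg_one)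
def pvB_taps (pol : List Int) (L : Nat) : List Nat :=
  let rev := (PySem.List.slice pol (some 1) none).reverse
  (List.range L).filter (fun (i : Nat) => PySem.List.pyGetD rev (i : Int) 0 == 1)

-- for j in range(L, n): seq.append(toggle-fold over seq[j - L + i] for i in taps)
-- (j = len(seq) throughout the loop, so the port indexes at seq.length - L + i)
def pvB_extend (taps : List Nat) (L : Nat) : Nat → List Int → List Int
  | 0, seq => seq
  | Nat.succ k, seq =>
    let x := taps.foldl (fun xor (i : Nat) =>
      if PySem.List.pyGetD seq ((seq.length : Int) - L + i) 0 == xor then (0 : Int) else 1) 0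
    pvB_extend taps L k (seq ++ [x])

-- stream(poly, state): nothing to do for n == 0; else compute the taps, extend the
-- copied state sequence up to n terms (range(L, n) is empty when n <= L), return seq[:n]
def pvB_stream (pol st : List Int) (n : Nat) : List Int :=
  if n = 0 then []
  else (pvB_extend (pvB_taps pol st.length) st.length (n - st.length) st).take n

def uoc_geffe_generator_alt (parameters_pol_0 : List Int × List Int) (parameters_pol_1 : List Int × List Int) (parameters_pol_2 : List Int × List Int) (num_bits : Int) : String :=
  let n := (max num_bits 0).toNat
  let s0 := pvB_stream parameters_pol_0.1 parameters_pol_0.2 n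
  let s1 := pvB_stream parameters_pol_1.1 parameters_pol_1.2 n
  let s2 := pvB_stream parameters_pol_2.1 parameters_pol_2.2 n
  -- "".join(str(b1 if b0 == 0 else b2) for b0, b1, b2 in zip(s0, s1, s2))
  String.mk ((s0.zip (s1.zip s2)).flatMap
    (fun t => PySem.Int.toChars (if t.1 == 0 then t.2.1 else t.2.2)))

-- ===== PRECONDITION & SPEC =====
-- Pre_ is exactly where Python A returns: each polynomial nonempty (else new_pol.pop()
-- raises IndexError), and when num_bits > 0 each state fits inside its tap vector
-- (else new_pol[i] raises IndexError in the first iteration).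
def Pre_uoc_geffe_generator (parameters_pol_0 : List Int × List Int) (parameters_pol_1 : List Int × List Int) (parameters_pol_2 : List Int × List Int) (num_bits : Int) : Prop :=
  parameters_pol_0.1 ≠ [] ∧ parameters_pol_1.1 ≠ [] ∧ parameters_pol_2.1 ≠ [] ∧
  (num_bits ≤ 0 ∨
    (parameters_pol_0.2.length + 1 ≤ parameters_pol_0.1.length ∧
     parameters_pol_1.2.length + 1 ≤ parameters_pol_1.1.length ∧
     parameters_pol_2.2.length + 1 ≤ parameters_pol_2.1.length))
instance (parameters_pol_0 : List Int × List Int) (parameters_pol_1 : List Int × List Int) (parameters_pol_2 : List Int × List Int) (num_bits : Int) : Decidable (Pre_uoc_geffe_generator parameters_pol_0 parameters_pol_1 parameters_pol_2 num_bits) := by unfold Pre_uoc_geffe_generator; infer_instance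

def pvWitness_uoc_geffe_generator : (List Int × List Int) × (List Int × List Int) × (List Int × List Int) × Int :=
  (([1, 0, 1], [1, 0]), ([1, 1, 1, 1], [0, 1, 1]), ([1, 0, 0, 1], [1, 1, 0]), 5)

def Spec_uoc_geffe_generator (parameters_pol_0 : List Int × List Int) (parameters_pol_1 : List Int × List Int) (parameters_pol_2 : List Int × List Int) (num_bits : Int) (out : String) : Prop := out = uoc_geffe_generator_alt parameters_pol_0 parameters_pol_1 parameters_pol_2 num_bits
instance (parameters_pol_0 : List Int × List Int) (parameters_pol_1 : List Int × List Int) (parameters_pol_2 : List Int × List Int) (num_bits : Int) (out : String) : Decidable (Spec_uoc_geffe_generator parameters_pol_0 parameters_pol_1 parameters_pol_2 num_bits out) := by unfold Spec_uoc_geffe_generator; infer_instance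

-- ===== CLAIM =====
def Claim_equal_uoc_geffe_generator : Prop := ∀ (parameters_pol_0 : List Int × List Int) (parameters_pol_1 : List Int × List Int) (parameters_pol_2 : List Int × List Int) (num_bits : Int), Dom_uoc_geffe_generator parameters_pol_0 parameters_pol_1 parameters_pol_2 num_bits → Pre_uoc_geffe_generator parameters_pol_0 parameters_pol_1 parameters_pol_2 num_bits → Spec_uoc_geffe_generator parameters_pol_0 parameters_pol_1 parameters_pol_2 num_bits (uoc_geffe_generator parameters_pol_0 parameters_pol_1 parameters_pol_2 num_bits)

-- ===== LEMMAS AND PROOFS =====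

-- the tap-index list as A sees it (positions of 1s in the reversed-popped polynomial)
def pvTaps (newPol : List Int) (L : Nat) : List Nat :=
  (List.range L).filter (fun (i : Nat) => PySem.List.pyGetD newPol (i : Int) 0 == 1)

-- the feedback bit as a fold over tap indices into the current window
def pvFb (taps : List Nat) (st : List Int) : Int :=
  taps.foldl (fun xor (i : Nat) => if PySem.List.pyGetD st (i : Int) 0 == xor then (0 : Int) else 1) 0

theorem pv_stepA (newPol : List Int) (st : List Int) :
    pvA_step newPol st =
      ((st ++ [pvFb (pvTaps newPol st.length) st]).headD 0,
       (st ++ [pvFb (pvTaps newPol st.length) st]).tail) := by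
  unfold pvA_step pvFb pvTaps
  rw [PySem.List.foldl_append_if]
  dsimp only
  rw [List.nil_append, List.foldl_map]

-- B's drop-constant-then-reverse taps = A's reversed-popped-polynomial taps
theorem pv_taps_eq (pol : List Int) (L : Nat) :
    pvB_taps pol L = pvTaps (pol.reverse.dropLast) L := by
  unfold pvB_taps pvTaps
  rw [PySem.List.slice_from_one]
  have h : pol.tail.reverse = pol.reverse.dropLast := by
    cases pol with
    | nil => rfl
    | cons a l => simp [List.dropLast_concat]
  simp only [h]

theorem pv_taps_lt (newPol : List Int) (L : Nat) : ∀ i ∈ pvTaps newPol L, i < L := by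
  intro i hi
  have := List.mem_filter.mp hi
  exact List.mem_range.mp this.1

-- Python indexing shifted by one past a cons cell
theorem pv_pyGetD_cons_succ (x : Int) (xs : List Int) (i : Nat) (d : Int) :
    PySem.List.pyGetD (x :: xs) ((i : Int) + 1) d = PySem.List.pyGetD xs (i : Int) d := by
  have h1 : ((i : Int) + 1) = ((i + 1 : Nat) : Int) := by push_cast; ring
  rw [h1, PySem.List.pyGetD_natCast, PySem.List.pyGetD_natCast, List.getD_cons_succ]

-- the extension loop only looks at the last L elements: a cons cell passes through
theorem pv_extend_cons (taps : List Nat) (L : Nat) (hlt : ∀ i ∈ taps, i < L) :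
    ∀ (k : Nat) (a : Int) (s : List Int), L ≤ s.length →
    pvB_extend taps L k (a :: s) = a :: pvB_extend taps L k s := by
  intro k
  induction k with
  | zero => intro a s _; rfl
  | succ k ih =>
    intro a s hL
    simp only [pvB_extend]
    have hfold : ∀ (init : Int),
        taps.foldl (fun xor (i : Nat) =>
          if PySem.List.pyGetD (a :: s) (((a :: s).length : Int) - L + i) 0 == xor then (0 : Int) else 1) init =
        taps.foldl (fun xor (i : Nat) =>
          if PySem.List.pyGetD s ((s.length : Int) - L + i) 0 == xor then (0 : Int) else 1) init := by
      intro init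
      apply PySem.List.foldl_congr_mem
      intro acc i hi
      have hiL : i < L := hlt i hi
      have e1 : ((a :: s).length : Int) - L + i = ((s.length - L + i : Nat) : Int) + 1 := by
        simp only [List.length_cons]; push_cast; omega
      have e2 : (s.length : Int) - L + i = ((s.length - L + i : Nat) : Int) := by
        push_cast; omega
      rw [e1, e2, pv_pyGetD_cons_succ]
    rw [hfold 0, List.cons_append]
    exact ih _ _ (by simp; omega)

-- at a window of length exactly L the fold index is just the tap index
theorem pv_extend_fb (taps : List Nat) (L : Nat) (k : Nat) (s : List Int) (hs : s.length = L) :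
    pvB_extend taps L (k + 1) s = pvB_extend taps L k (s ++ [pvFb taps s]) := by
  simp only [pvB_extend]
  have hf : taps.foldl (fun xor (i : Nat) =>
      if PySem.List.pyGetD s ((s.length : Int) - L + i) 0 == xor then (0 : Int) else 1) 0
      = pvFb taps s := by
    unfold pvFb
    apply PySem.List.foldl_congr_mem
    intro acc i _
    have e : ((s.length : Int) - L + i) = (i : Int) := by rw [hs]; ring
    rw [e]
  rw [hf]

-- main lemma: A's register simulation = B's recurrence extension, truncated
theorem pv_main (newPol : List Int) (L : Nat) :
    ∀ (n : Nat) (st : List Int), st.length = L →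
    pvA_lfsr newPol n st = (pvB_extend (pvTaps newPol L) L (n - L) st).take n := by
  intro n
  induction n with
  | zero => intro st _; rfl
  | succ n ih =>
    intro st hst
    have hstep := pv_stepA newPol st
    rw [hst] at hstep
    set taps := pvTaps newPol L with htaps
    set x := pvFb taps st with hx
    simp only [pvA_lfsr, hstep]
    rcases st with _ | ⟨h, t⟩
    · -- L = 0
      have hL : L = 0 := by simpa using hst.symm
      subst hL
      have hx0 : x = 0 := by
        rw [hx]
        unfold pvFb
        have : taps = [] := by rw [htaps]; rfl
        rw [this]; rfl
      simp only [List.nil_append, List.headD, List.tail, hx0]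
      have : (n + 1) - 0 = n + 1 := rfl
      rw [this, pv_extend_fb taps 0 n [] rfl]
      have h0 : pvFb taps [] = 0 := by
        unfold pvFb
        have : taps = [] := by rw [htaps]; rfl
        rw [this]; rfl
      rw [h0, List.nil_append, pv_extend_cons taps 0 (pv_taps_lt newPol 0) n 0 [] (by simp)]
      rw [List.take_succ_cons]
      congr 1
      simpa using ih [] rfl
    · -- L = t.length + 1, st = h :: t
      have hL : L = t.length + 1 := by simpa using hst.symm
      have htx : ((h :: t) ++ [x]).headD 0 = h := rfl
      have httl : ((h :: t) ++ [x]).tail = t ++ [x] := rfl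
      rw [htx, httl]
      have hlen : (t ++ [x]).length = L := by simp [hL]
      by_cases hc : n + 1 ≤ L
      · have e0 : (n + 1) - L = 0 := by omega
        have e0' : n - L = 0 := by omega
        rw [e0]
        simp only [pvB_extend]
        rw [List.take_succ_cons]
        congr 1
        rw [ih (t ++ [x]) hlen, e0']
        simp only [pvB_extend]
        rw [List.take_append_of_le_length (by omega)]
      · have e1 : (n + 1) - L = (n - L) + 1 := by omega
        rw [e1, pv_extend_fb taps L (n - L) (h :: t) hst, ← hx, List.cons_append,
            pv_extend_cons taps L (pv_taps_lt newPol L) (n - L) h (t ++ [x]) (by omega),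
            List.take_succ_cons]
        congr 1
        exact ih (t ++ [x]) hlen

theorem pv_lfsr_length (newPol : List Int) :
    ∀ (n : Nat) (st : List Int), (pvA_lfsr newPol n st).length = n := by
  intro n
  induction n with
  | zero => intro st; rfl
  | succ n ih => intro st; simp [pvA_lfsr, ih]

-- A's combine foldl is a flatMap over the index range
theorem pv_combine_flatMap (l0 l1 l2 : List Int) (n : Nat) :
    pvA_combine l0 l1 l2 n
      = (List.range n).flatMap (fun (i : Nat) =>
          PySem.Int.toChars (if PySem.List.pyGetD l0 (i : Int) 0 == 0
            then PySem.List.pyGetD l1 (i : Int) 0 else PySem.List.pyGetD l2 (i : Int) 0)) := by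
  unfold pvA_combine
  rw [PySem.List.foldl_append_eq_flatMap, List.nil_append]

-- peeling one index off A's combine of three nonempty lists
theorem pv_combine_cons (a0 a1 a2 : Int) (r0 r1 r2 : List Int) (n : Nat) :
    pvA_combine (a0 :: r0) (a1 :: r1) (a2 :: r2) (n + 1)
      = PySem.Int.toChars (if a0 == 0 then a1 else a2) ++ pvA_combine r0 r1 r2 n := by
  rw [pv_combine_flatMap, pv_combine_flatMap, List.range_succ_eq_map, List.flatMap_cons,
      List.flatMap_map]
  congr 1
  · norm_num [PySem.List.pyGetD_natCast]
  · congr 1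
    funext i
    push_cast
    simp only [pv_pyGetD_cons_succ]

-- A's indexed combine = B's zip flatMap, when all three lists have length n
theorem pv_combine_zip :
    ∀ (n : Nat) (l0 l1 l2 : List Int), l0.length = n → l1.length = n → l2.length = n →
    pvA_combine l0 l1 l2 n
      = (l0.zip (l1.zip l2)).flatMap
          (fun t => PySem.Int.toChars (if t.1 == 0 then t.2.1 else t.2.2)) := by
  intro n
  induction n with
  | zero =>
    intro l0 l1 l2 h0 h1 h2
    rw [List.eq_nil_of_length_eq_zero h0]
    rfl
  | succ n ih =>
    intro l0 l1 l2 h0 h1 h2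
    rcases l0 with _ | ⟨a0, r0⟩; · simp at h0
    rcases l1 with _ | ⟨a1, r1⟩; · simp at h1
    rcases l2 with _ | ⟨a2, r2⟩; · simp at h2
    rw [pv_combine_cons, List.zip_cons_cons, List.zip_cons_cons, List.flatMap_cons,
        ih r0 r1 r2 (by simpa using h0) (by simpa using h1) (by simpa using h2)]

-- ===== VERDICT =====
theorem uoc_geffe_generator_spec : Claim_equal_uoc_geffe_generator := by
  intro p0 p1 p2 nb _ hpre
  obtain ⟨hp0, hp1, hp2, hbr⟩ := hpre
  unfold Spec_uoc_geffe_generator uoc_geffe_generator uoc_geffe_generator_alt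
  by_cases hnb : nb ≤ 0
  · have h1 : nb.toNat = 0 := by omega
    have h2 : (max nb 0).toNat = 0 := by omega
    rw [h1, h2]
    rfl
  · have hlen := hbr.resolve_left hnb
    obtain ⟨hl0, hl1, hl2⟩ := hlen
    have h2 : (max nb 0).toNat = nb.toNat := by omega
    rw [h2]
    have stream_eq : ∀ (pol st : List Int),
        pvA_lfsr (pol.reverse.dropLast) nb.toNat st = pvB_stream pol st nb.toNat := by
      intro pol st
      unfold pvB_stream
      rw [if_neg (by omega : ¬ nb.toNat = 0), pv_taps_eq pol st.length]
      exact pv_main (pol.reverse.dropLast) st.length nb.toNat st rfl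
    have e0 := stream_eq p0.1 p0.2
    have e1 := stream_eq p1.1 p1.2
    have e2 := stream_eq p2.1 p2.2
    simp only [← e0, ← e1, ← e2]
    congr 1
    exact pv_combine_zip nb.toNat _ _ _ (pv_lfsr_length _ _ _) (pv_lfsr_length _ _ _)
      (pv_lfsr_length _ _ _)
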